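-- pv_equiv track=rewrite | github.com/htang7415/Max-Handbook | modules/databases/vector-db/hybrid-retrieval-evaluation/python/hybrid_retrieval_evaluation.py | unique_hits_within_k
-- ===== SOURCE A (Python) =====
-- def unique_hits_within_k(ranked_ids: list[str], relevant_ids: set[str], k: int) -> int:
--     seen: set[str] = set()
--     hits = 0
--     for doc_id in ranked_ids[:k]:
--         if doc_id in relevant_ids and doc_id not in seen:
--             hits += 1
--         seen.add(doc_id)
--     return hits
-- ===== SOURCE B (Python) =====
-- def unique_hits_within_k(ranked_ids: list[str], relevant_ids: set[str], k: int) -> int: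
--     top = set(ranked_ids[:k])
--     return sum(1 for r in relevant_ids if r in top)
-- ===== Notes on version B (the rewrite author's own statement) =====
-- stated objective: alternative
-- what changed: Inverts the traversal: instead of scanning the ranked list while maintaining a seen-set and a running counter, B scans the relevant set once and counts the ids that occur in the (deduplicating) set of the top-k slice; set elements are distinct, so no seen-set bookkeeping is needed.
import Mathlib
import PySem

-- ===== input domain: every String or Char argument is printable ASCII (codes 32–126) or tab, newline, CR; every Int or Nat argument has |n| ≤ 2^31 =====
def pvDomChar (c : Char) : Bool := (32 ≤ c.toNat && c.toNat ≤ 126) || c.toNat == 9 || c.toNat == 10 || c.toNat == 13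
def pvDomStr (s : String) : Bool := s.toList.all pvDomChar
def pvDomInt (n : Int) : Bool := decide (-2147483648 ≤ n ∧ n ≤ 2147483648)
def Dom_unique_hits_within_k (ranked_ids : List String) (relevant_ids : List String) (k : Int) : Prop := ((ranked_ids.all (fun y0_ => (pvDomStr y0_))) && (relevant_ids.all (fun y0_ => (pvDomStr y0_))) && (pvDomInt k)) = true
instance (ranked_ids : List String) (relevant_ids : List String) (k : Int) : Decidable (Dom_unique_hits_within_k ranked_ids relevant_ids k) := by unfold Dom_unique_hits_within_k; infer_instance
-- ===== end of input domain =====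

-- B inverts the traversal: it scans the relevant set once and counts the ids occurring in the
-- top-k slice, instead of A's scan of the ranked list with a seen-set and a counter (alternative).

-- ===== PORT A =====
def unique_hits_within_k (ranked_ids : List String) (relevant_ids : List String) (k : Int) : Int :=
  ((PySem.List.slice ranked_ids none (some k)).foldl
    (fun (st : PySem.Set String × Int) doc_id =>
      (PySem.Set.add st.1 doc_id,
       if PySem.Set.contains relevant_ids doc_id && !(PySem.Set.contains st.1 doc_id)
       then st.2 + 1 else st.2))
    (PySem.Set.empty, 0)).2

-- ===== PORT B =====
def unique_hits_within_k_alt (ranked_ids : List String) (relevant_ids : List String) (k : Int) : Int :=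
  let top := PySem.Set.ofList (PySem.List.slice ranked_ids none (some k))
  -- sum(1 for r in relevant_ids if r in top): a count, so independent of the set's iteration order
  relevant_ids.foldl (fun acc r => if PySem.Set.contains top r then acc + 1 else acc) 0

-- ===== PRECONDITION & SPEC =====
-- Pre_ is only the representation invariant of the Python 'set' parameter (its distinct
-- elements as a list); it excludes no input the Python function accepts.
def Pre_unique_hits_within_k (ranked_ids : List String) (relevant_ids : List String) (k : Int) : Prop :=
  relevant_ids.Nodup
instance (ranked_ids : List String) (relevant_ids : List String) (k : Int) : Decidable (Pre_unique_hits_within_k ranked_ids relevant_ids k) := by unfold Pre_unique_hits_within_k; infer_instance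
def pvWitness_unique_hits_within_k : List String × List String × Int := (["a", "b", "a"], ["a", "c"], 2)

def Spec_unique_hits_within_k (ranked_ids : List String) (relevant_ids : List String) (k : Int) (out : Int) : Prop := out = unique_hits_within_k_alt ranked_ids relevant_ids k
instance (ranked_ids : List String) (relevant_ids : List String) (k : Int) (out : Int) : Decidable (Spec_unique_hits_within_k ranked_ids relevant_ids k out) := by unfold Spec_unique_hits_within_k; infer_instance

-- ===== CLAIM (what is proved, stated in full; the proofs are below) =====
def Claim_equal_unique_hits_within_k : Prop := ∀ (ranked_ids : List String) (relevant_ids : List String) (k : Int), Dom_unique_hits_within_k ranked_ids relevant_ids k → Pre_unique_hits_within_k ranked_ids relevant_ids k → Spec_unique_hits_within_k ranked_ids relevant_ids k (unique_hits_within_k ranked_ids relevant_ids k)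

-- ===== LEMMAS AND PROOFS =====

-- Loop invariant for A's fold: the counter plus the relevant part of the set already seen
-- equals the starting counter plus the relevant part of the set after absorbing xs.
theorem pv_loop_inv (relevant_ids : List String) :
    ∀ (xs : List String) (seen : PySem.Set String) (hits : Int),
    (xs.foldl
      (fun (st : PySem.Set String × Int) doc_id =>
        (PySem.Set.add st.1 doc_id,
         if PySem.Set.contains relevant_ids doc_id && !(PySem.Set.contains st.1 doc_id)
         then st.2 + 1 else st.2))
      (seen, hits)).2
      + ((seen.filter (fun d => PySem.Set.contains relevant_ids d)).length : Int)
    = hits + (((xs.foldl PySem.Set.add seen).filter (fun d => PySem.Set.contains relevant_ids d)).length : Int) := by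
  intro xs
  induction xs with
  | nil => intro seen hits; simp
  | cons x xs ih =>
    intro seen hits
    simp only [List.foldl_cons]
    have h := ih (PySem.Set.add seen x)
      (if PySem.Set.contains relevant_ids x && !(PySem.Set.contains seen x) then hits + 1 else hits)
    have hstep :
        (PySem.Set.add seen x).filter (fun d => PySem.Set.contains relevant_ids d)
          = if x ∈ seen then seen.filter (fun d => PySem.Set.contains relevant_ids d)
            else seen.filter (fun d => PySem.Set.contains relevant_ids d)
                 ++ (if x ∈ relevant_ids then [x] else []) := by
      simp only [PySem.Set.add, PySem.Set.contains, List.contains_eq_mem]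
      by_cases hm : x ∈ seen
      · simp [hm]
      · by_cases hr : x ∈ relevant_ids <;> simp [hm, hr]
    rw [hstep] at h
    by_cases h1 : x ∈ seen <;>
      by_cases hr : x ∈ relevant_ids <;>
        simp [PySem.Set.contains, List.contains_eq_mem, h1, hr] at h ⊢ <;> omega

-- B's counting fold is the length of a filter.
theorem pv_count_fold (top : PySem.Set String) :
    ∀ (l : List String) (c : Int),
    l.foldl (fun acc r => if PySem.Set.contains top r then acc + 1 else acc) c
      = c + ((l.filter (fun r => PySem.Set.contains top r)).length : Int) := by
  intro l
  induction l with
  | nil => intro c; simp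
  | cons x xs ih =>
    intro c
    simp only [List.foldl_cons, List.filter_cons]
    cases hx : PySem.Set.contains top x <;>
      simp only [hx, if_true, if_false, ih, List.length_cons] <;> push_cast <;> ring

-- ===== VERDICT (by name: the statement is the Claim_ definition above) =====
theorem unique_hits_within_k_spec : Claim_equal_unique_hits_within_k := by
  intro ranked_ids relevant_ids k _ hpre
  show unique_hits_within_k ranked_ids relevant_ids k = unique_hits_within_k_alt ranked_ids relevant_ids k
  unfold unique_hits_within_k unique_hits_within_k_alt
  set top := PySem.List.slice ranked_ids none (some k) with htop
  have hA := pv_loop_inv relevant_ids top PySem.Set.empty 0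
  simp only [PySem.Set.empty, List.filter_nil, List.length_nil, Nat.cast_zero, add_zero,
    zero_add] at hA
  simp only [PySem.Set.empty] at hA ⊢
  rw [hA, pv_count_fold (PySem.Set.ofList top) relevant_ids 0, zero_add]
  -- both sides count the members of top ∩ relevant: the two filtered lists are Nodup
  -- with the same membership, hence a permutation, hence of equal length
  have hfold : top.foldl PySem.Set.add [] = PySem.Set.ofList top :=
    (PySem.Set.ofList_eq_foldl top).symm
  rw [hfold]
  have h1 : ((PySem.Set.ofList top).filter (fun d => PySem.Set.contains relevant_ids d)).Nodup :=
    (PySem.Set.nodup_ofList top).filter _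
  have h2 : (relevant_ids.filter (fun r => PySem.Set.contains (PySem.Set.ofList top) r)).Nodup := hpre.filter _
  have hperm : List.Perm ((PySem.Set.ofList top).filter (fun d => PySem.Set.contains relevant_ids d))
      (relevant_ids.filter (fun r => PySem.Set.contains (PySem.Set.ofList top) r)) := by
    rw [List.perm_ext_iff_of_nodup h1 h2]
    intro a
    simp [List.mem_filter, PySem.Set.mem_ofList, PySem.Set.contains, List.contains_eq_mem,
      and_comm]
  rw [hperm.length_eq]
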